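-- pv_equiv track=rewrite | github.com/nicolechoong/pythonchallenges | a-venture-into-binary-trees.py | string_token
-- ===== SOURCE A (Python) =====
-- def string_token(stringo):
--     tokens = []
--     tok = ""
--     for char in stringo:
--         if char not in ''' .?!,;:-()'"@#$%^&*+=[]{}|<>''':
--             tok += char
--         else:
--             tokens.append(tok)
--             if char != " ": tokens.append(char)
--             tok = ""
--
--     return tokens
-- ===== SOURCE B (Python) =====
-- DELIMS = frozenset(''' .?!,;:-()'"@#$%^&*+=[]{}|<>''')
--
-- def string_token(stringo):
--     # Slice-based tokenizer: keep a start index instead of growing a token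
--     # string char by char; the trailing segment is (as in the original) dropped.
--     tokens = []
--     start = 0
--     for i, ch in enumerate(stringo):
--         if ch in DELIMS:
--             tokens.append(stringo[start:i])
--             if ch != " ":
--                 tokens.append(ch)
--             start = i + 1
--     return tokens
-- ===== Notes on version B (the rewrite author's own statement) =====
-- stated objective: alternative
-- what changed: B replaces A's char-by-char token accumulator with an index/slice tokenizer: it scans (index, char) pairs, remembers only the start offset of the current token and emits it as a slice stringo[start:i] at each delimiter.
import Mathlib
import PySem

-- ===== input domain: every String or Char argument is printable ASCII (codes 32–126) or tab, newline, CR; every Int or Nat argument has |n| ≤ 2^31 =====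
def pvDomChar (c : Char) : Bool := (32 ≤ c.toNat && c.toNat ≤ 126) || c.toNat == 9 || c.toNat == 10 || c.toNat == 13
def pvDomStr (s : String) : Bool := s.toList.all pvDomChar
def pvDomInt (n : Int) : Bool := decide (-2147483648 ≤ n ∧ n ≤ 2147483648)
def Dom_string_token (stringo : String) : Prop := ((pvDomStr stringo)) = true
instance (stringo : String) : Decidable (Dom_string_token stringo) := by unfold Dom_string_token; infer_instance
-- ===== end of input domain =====

-- B replaces A's char-by-char token accumulator with an index/slice scan over (index, char) pairs; return values are equal on all inputs.

-- the delimiter string ''' .?!,;:-()'"@#$%^&*+=[]{}|<>''' (leading space included)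
def pvDelims : List Char := " .?!,;:-()'\"@#$%^&*+=[]{}|<>".toList

-- ===== PORT A =====
-- Python str accumulation 'tok += char' is ported over List Char, with String.ofList
-- applied at each token boundary (exact: a Lean String is its list of chars).
def string_token (stringo : String) : List String :=
  (stringo.toList.foldl
    (fun (st : List String × List Char) c =>
      if c ∉ pvDelims then
        (st.1, st.2 ++ [c])
      else
        (st.1 ++ [String.ofList st.2] ++ (if c ≠ ' ' then [String.ofList [c]] else []), []))
    ([], [])).1

-- ===== PORT B =====
-- 'for i, ch in enumerate(stringo)' → PySem.List.enumerate; the slice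
-- stringo[start:i] → PySem.List.slice on the char list (exact).
def string_token_alt (stringo : String) : List String :=
  let cs := stringo.toList
  ((PySem.List.enumerate cs 0).foldl
    (fun (st : List String × Int) p =>
      if p.2 ∈ pvDelims then
        (st.1 ++ [String.ofList (PySem.List.slice cs (some st.2) (some p.1))]
              ++ (if p.2 ≠ ' ' then [String.ofList [p.2]] else []),
         p.1 + 1)
      else st)
    ([], 0)).1

-- ===== PRECONDITION & SPEC =====
def Spec_string_token (stringo : String) (out : List String) : Prop := out = string_token_alt stringo
instance (stringo : String) (out : List String) : Decidable (Spec_string_token stringo out) := by unfold Spec_string_token; infer_instance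

-- ===== CLAIM (what is proved, stated in full; the proofs are below) =====
def Claim_equal_string_token : Prop := ∀ (stringo : String), Dom_string_token stringo → Spec_string_token stringo (string_token stringo)

-- ===== LEMMAS AND PROOFS =====

-- reference recursion: the tokens still to be produced from suffix l with pending token tok
def goR : List Char → List Char → List String
  | [], _ => []
  | c :: l, tok =>
    if c ∉ pvDelims then goR l (tok ++ [c])
    else String.ofList tok :: (if c ≠ ' ' then [String.ofList [c]] else []) ++ goR l []

lemma foldA_eq (l : List Char) (toks : List String) (tok : List Char) :
    (l.foldl
      (fun (st : List String × List Char) c =>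
        if c ∉ pvDelims then
          (st.1, st.2 ++ [c])
        else
          (st.1 ++ [String.ofList st.2] ++ (if c ≠ ' ' then [String.ofList [c]] else []), []))
      (toks, tok)).1 = toks ++ goR l tok := by
  induction l generalizing toks tok with
  | nil => simp [goR]
  | cons c l ih =>
    simp only [List.foldl_cons]
    by_cases h : c ∉ pvDelims
    · rw [if_pos h, ih]; simp [goR, h]
    · rw [if_neg h, ih]; simp [goR, h]

lemma foldB_eq (l : List Char) (k start : Nat) (toks : List String) (tok : List Char)
    (cs : List Char) (hdrop : cs.drop start = tok ++ l) (hk : start + tok.length = k) :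
    ((PySem.List.enumerate l (k : Int)).foldl
      (fun (st : List String × Int) p =>
        if p.2 ∈ pvDelims then
          (st.1 ++ [String.ofList (PySem.List.slice cs (some st.2) (some p.1))]
                ++ (if p.2 ≠ ' ' then [String.ofList [p.2]] else []),
           p.1 + 1)
        else st)
      (toks, (start : Int))).1 = toks ++ goR l tok := by
  induction l generalizing k start toks tok with
  | nil => simp [PySem.List.enumerate, goR]
  | cons c l ih =>
    rw [PySem.List.enumerate_cons]
    by_cases h : c ∈ pvDelims
    · have hslice : PySem.List.slice cs (some (start : Int)) (some (k : Int)) = tok := by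
        rw [PySem.List.slice_natCast, hdrop]
        have : k - start = tok.length := by omega
        simp [this]
      have hdrop' : cs.drop (k + 1) = [] ++ l := by
        have : cs.drop (k + 1) = (cs.drop start).drop (k + 1 - start) := by
          rw [List.drop_drop]; congr 1; omega
        rw [this, hdrop]
        have : k + 1 - start = tok.length + 1 := by omega
        simp [this]
      have hcast : ((k : Int) + 1) = ((k + 1 : Nat) : Int) := by push_cast; ring
      simp only [List.foldl_cons, if_pos h, hslice, hcast]
      rw [ih (k + 1) (k + 1) _ [] hdrop' (by simp)]
      simp [goR, h]
    · have hdrop' : cs.drop start = (tok ++ [c]) ++ l := by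
        rw [hdrop]; simp
      have hcast : ((k : Int) + 1) = ((k + 1 : Nat) : Int) := by push_cast; ring
      simp only [List.foldl_cons, if_neg h, hcast]
      rw [ih (k + 1) start _ (tok ++ [c]) hdrop' (by simp; omega)]
      simp [goR, h]

-- ===== VERDICT (by name: the statement is the Claim_ definition above) =====
theorem string_token_spec : Claim_equal_string_token := by
  intro s _
  unfold Spec_string_token string_token string_token_alt
  rw [foldA_eq]
  have := foldB_eq s.toList 0 0 [] [] s.toList (by simp) (by simp)
  simp only [Nat.cast_zero] at this
  rw [this]
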